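-- pv_equiv track=rewrite | github.com/guejohn/Unicamp | tarefa05/modulo_analise.py | histograma
-- ===== SOURCE A (Python) =====
-- def histograma(valores, intervalos):
--     """
--     Cria uma lista com as frequências do histograma de 'valores', divididas nas
--     classes conforme a lista 'intervalos'. Por exemplo, se temos [10, 20, 30]
--     como intervalos, devemos obter as frequências dos intervalos [10, 20) e [20,
--     30).
--
--     Parâmetros: listas de números.
--     Retorna: lista de frequência do histograma.
--     """
--     num_intervalos = len(intervalos)-1
--     frequencia_histograma = [0 for _ in range(num_intervalos)]
--
--     for i in range(num_intervalos):
--         min = intervalos[i]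
--         max = intervalos[i+1]
--         for elemento in valores:
--             if (elemento >= min and elemento < max):
--                 frequencia_histograma[i]+=1
--
--     return frequencia_histograma
-- ===== SOURCE B (Python) =====
-- def histograma(valores, intervalos):
--     """Sort the values once, then answer each class with two binary searches:
--     count(lo <= x < hi) = (#values < hi) - (#values < lo)."""
--     orden = sorted(valores)
--
--     def conta_menores(x):
--         # number of elements of 'orden' strictly below x (hand-written bisect_left)
--         lo = 0
--         hi = len(orden)
--         while lo < hi:
--             mid = (lo + hi) // 2
--             if orden[mid] < x:
--                 lo = mid + 1
--             else:
--                 hi = mid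
--         return lo
--
--     return [max(conta_menores(b) - conta_menores(a), 0)
--             for a, b in zip(intervalos, intervalos[1:])]
-- ===== Notes on version B (the rewrite author's own statement) =====
-- stated objective: faster
-- what changed: Instead of scanning all values once per interval, B sorts the values once and answers each class [lo,hi) with two hand-written binary searches, as max(bisect_left(hi)-bisect_left(lo),0).
import Mathlib
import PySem

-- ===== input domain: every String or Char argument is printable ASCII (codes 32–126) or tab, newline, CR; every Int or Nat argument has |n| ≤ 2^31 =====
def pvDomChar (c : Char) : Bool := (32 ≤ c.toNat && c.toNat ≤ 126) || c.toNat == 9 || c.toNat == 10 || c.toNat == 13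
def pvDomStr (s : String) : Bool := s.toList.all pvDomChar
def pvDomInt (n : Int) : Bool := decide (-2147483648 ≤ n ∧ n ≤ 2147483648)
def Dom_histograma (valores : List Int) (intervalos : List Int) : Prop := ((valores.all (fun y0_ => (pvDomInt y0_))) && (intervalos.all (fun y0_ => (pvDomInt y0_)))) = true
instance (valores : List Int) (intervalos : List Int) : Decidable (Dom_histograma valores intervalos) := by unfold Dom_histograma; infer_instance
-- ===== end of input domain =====

-- B sorts the values once and answers each class [lo,hi) with two hand-written binary
-- searches, max(#values<hi - #values<lo, 0), instead of rescanning all values per class.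

-- ===== PORT A =====
def histograma (valores : List Int) (intervalos : List Int) : List Int :=
  let numIntervalos : Int := (intervalos.length : Int) - 1
  let frequencia : List Int := (PySem.List.pyRange 0 numIntervalos 1).map (fun _ => 0)
  (PySem.List.pyRange 0 numIntervalos 1).foldl (fun freq i =>
    let mn := PySem.List.pyGetD intervalos i 0
    let mx := PySem.List.pyGetD intervalos (i + 1) 0
    valores.foldl (fun freq elemento =>
      if elemento ≥ mn ∧ elemento < mx then
        PySem.List.pySetD freq i (PySem.List.pyGetD freq i 0 + 1)
      else freq) freq) frequencia

-- ===== PORT B =====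
-- the hand-written 'while lo < hi' binary search of Source B, step for step
def contaMenoresLoop (orden : List Int) (x : Int) (lo hi : Int) : Int :=
  if h : lo < hi then
    let mid := PySem.Int.floordiv (lo + hi) 2
    if PySem.List.pyGetD orden mid 0 < x then
      contaMenoresLoop orden x (mid + 1) hi
    else
      contaMenoresLoop orden x lo mid
  else lo
termination_by (hi - lo).toNat
decreasing_by
  · have := PySem.Int.floordiv_two_mid_bounds (le_of_lt h)
    omega
  · have hlt : PySem.Int.floordiv (lo + hi) 2 < hi := by
      rw [PySem.Int.floordiv_lt_iff_lt_mul (by omega)]; omega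
    omega

def contaMenores (orden : List Int) (x : Int) : Int :=
  contaMenoresLoop orden x 0 (orden.length : Int)

def histograma_alt (valores : List Int) (intervalos : List Int) : List Int :=
  let orden := PySem.List.sorted valores id
  (intervalos.zip intervalos.tail).map (fun p =>
    max (contaMenores orden p.2 - contaMenores orden p.1) 0)

-- ===== PRECONDITION & SPEC =====
def Spec_histograma (valores : List Int) (intervalos : List Int) (out : List Int) : Prop := out = histograma_alt valores intervalos
instance (valores : List Int) (intervalos : List Int) (out : List Int) : Decidable (Spec_histograma valores intervalos out) := by unfold Spec_histograma; infer_instance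

-- ===== CLAIM (what is proved, stated in full; the proofs are below) =====
def Claim_equal_histograma : Prop := ∀ (valores : List Int) (intervalos : List Int), Dom_histograma valores intervalos → Spec_histograma valores intervalos (histograma valores intervalos)

-- ===== LEMMAS AND PROOFS =====

-- the count of valores falling in class j = [intervalos[j], intervalos[j+1])
def cntf (valores intervalos : List Int) (j : Nat) : Int :=
  (valores.countP (fun e => decide (e ≥ intervalos.getD j 0 ∧ e < intervalos.getD (j + 1) 0)) : Int)

-- A's inner loop over valores only increments cell i, by the number of matching values
lemma innerA (mn mx : Int) : ∀ (valores : List Int) (freq : List Int) (i : Nat), i < freq.length →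
    valores.foldl (fun f e => if e ≥ mn ∧ e < mx then f.set i (f.getD i 0 + 1) else f) freq
    = freq.set i (freq.getD i 0 + (valores.countP (fun e => decide (e ≥ mn ∧ e < mx)) : Int))
  | [], freq, i, hi => by
    simp only [List.foldl_nil, List.countP_nil, Int.natCast_zero, add_zero]
    rw [List.getD_eq_getElem freq 0 hi, List.set_getElem_self]
  | e :: t, freq, i, hi => by
    rw [List.foldl_cons]
    by_cases h : e ≥ mn ∧ e < mx
    · rw [if_pos h, innerA mn mx t _ i (by simpa using hi)]
      have hv : (freq.set i (freq.getD i 0 + 1)).getD i 0 = freq.getD i 0 + 1 := by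
        rw [List.getD_eq_getElem _ 0 (by simpa using hi), List.getElem_set_self]
      rw [hv, List.set_set, List.countP_cons_of_pos (by simpa using h)]
      congr 1
      push_cast
      ring
    · rw [if_neg h, innerA mn mx t freq i hi, List.countP_cons_of_neg (by simpa using h)]

-- A's outer loop, after m of the k classes: the first m cells are the class counts
lemma outerA (valores intervalos : List Int) (k : Nat) (hk : k + 1 = intervalos.length) :
    ∀ m : Nat, m ≤ k →
    (PySem.List.pyRange 0 (m : Int) 1).foldl (fun freq i =>
      let mn := PySem.List.pyGetD intervalos i 0
      let mx := PySem.List.pyGetD intervalos (i + 1) 0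
      valores.foldl (fun freq elemento =>
        if elemento ≥ mn ∧ elemento < mx then
          PySem.List.pySetD freq i (PySem.List.pyGetD freq i 0 + 1)
        else freq) freq) (List.replicate k 0)
    = (List.range m).map (cntf valores intervalos) ++ List.replicate (k - m) 0 := by
  intro m
  induction m with
  | zero => simp [PySem.List.pyRange_one_eq_nil]
  | succ m ih =>
    intro hm
    have hcast : ((m + 1 : Nat) : Int) = (m : Int) + 1 := by push_cast; ring
    rw [hcast, PySem.List.pyRange_one_succ_right (by positivity), List.foldl_append, ih (by omega)]
    simp only [List.foldl_cons, List.foldl_nil]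
    have hlen : ((List.range m).map (cntf valores intervalos) ++ List.replicate (k - m) 0).length = k := by
      simp; omega
    have hmx : PySem.List.pyGetD intervalos ((m : Int) + 1) 0 = intervalos.getD (m + 1) 0 := by
      rw [← hcast, PySem.List.pyGetD_natCast]
    simp only [PySem.List.pyGetD_natCast, PySem.List.pySetD_natCast, hmx]
    rw [innerA _ _ valores _ m (by omega)]
    have hS : (List.range m).map (cntf valores intervalos) ++ List.replicate (k - m) 0
        = (List.range m).map (cntf valores intervalos) ++ (0 :: List.replicate (k - m - 1) 0) := by
      congr 1
      have h1 : k - m = (k - m - 1) + 1 := by omega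
      conv_lhs => rw [h1, List.replicate_succ]
    rw [hS]
    have hgd : ((List.range m).map (cntf valores intervalos) ++ (0 :: List.replicate (k - m - 1) 0)).getD m 0 = 0 := by
      rw [List.getD_eq_getElem _ 0 (by simp; try omega), List.getElem_append_right (by simp)]
      simp
    rw [hgd, List.set_append_right _ _ (by simp)]
    simp only [List.length_map, List.length_range, Nat.sub_self, List.set_cons_zero]
    rw [List.range_succ, List.map_append, List.append_assoc]
    congr 1
    simp only [List.map_cons, List.map_nil, List.cons_append, List.nil_append, zero_add]
    congr 2

-- A computes exactly the per-class counts, in order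
lemma histograma_eq_map (valores intervalos : List Int) :
    histograma valores intervalos
    = (List.range (intervalos.length - 1)).map (cntf valores intervalos) := by
  cases intervalos with
  | nil =>
    simp [histograma, PySem.List.pyRange_one_eq_nil (by norm_num : (-1:Int) ≤ 0)]
  | cons a t =>
    unfold histograma
    have hk : ((a :: t).length : Int) - 1 = (t.length : Int) := by simp
    have hinit : (PySem.List.pyRange 0 ((t.length : Int)) 1).map (fun _ => (0:Int)) = List.replicate t.length 0 := by
      rw [List.map_const']
      congr 1
      simp [PySem.List.length_pyRange_one]
    simp only [hk, hinit]
    have := outerA valores (a :: t) t.length (by simp) t.length (le_refl _)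
    simp only [Nat.sub_self, List.replicate_zero, List.append_nil] at this
    rw [this]
    simp

-- B's zip over consecutive boundaries, as a map over class indices
lemma zipPairs (f : Int × Int → Int) : ∀ (l : List Int),
    (l.zip l.tail).map f
    = (List.range (l.length - 1)).map (fun j => f (l.getD j 0, l.getD (j + 1) 0))
  | [] => by simp
  | [a] => by simp
  | a :: b :: t => by
    have ih := zipPairs f (b :: t)
    simp only [List.tail_cons, List.zip_cons_cons, List.map_cons] at *
    rw [ih]
    have : (a :: b :: t).length - 1 = ((b :: t).length - 1) + 1 := by simp
    rw [this, List.range_succ_eq_map, List.map_cons, List.map_map]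
    congr 1

-- a list whose first r entries are < x and whose remaining entries are ≥ x has exactly r entries < x
lemma countP_of_split (l : List Int) (x : Int) (r : Nat) (hr : r ≤ l.length)
    (h1 : ∀ j (hj : j < l.length), j < r → l[j] < x)
    (h2 : ∀ j (hj : j < l.length), r ≤ j → x ≤ l[j]) :
    l.countP (fun y => decide (y < x)) = r := by
  have hsplit : l = l.take r ++ l.drop r := (List.take_append_drop r l).symm
  rw [hsplit, List.countP_append]
  have htake : (l.take r).countP (fun y => decide (y < x)) = r := by
    rw [List.countP_eq_length.2, List.length_take_of_le hr]
    intro a ha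
    obtain ⟨i, hi, rfl⟩ := List.mem_iff_getElem.1 ha
    rw [List.getElem_take]
    simp only [decide_eq_true_eq]
    exact h1 i (by simp at hi; omega) (by simp at hi; omega)
  have hdrop : (l.drop r).countP (fun y => decide (y < x)) = 0 := by
    rw [List.countP_eq_zero]
    intro a ha
    obtain ⟨i, hi, rfl⟩ := List.mem_iff_getElem.1 ha
    rw [List.getElem_drop]
    simp only [decide_eq_true_eq, not_lt]
    exact h2 (r + i) (by simp at hi; omega) (by omega)
  omega

-- invariant proof of the binary search: on a sorted list it returns the number of elements < x
lemma loop_inv (orden : List Int) (x : Int) : ∀ (lo hi : Int), 0 ≤ lo → lo ≤ hi → hi ≤ (orden.length : Int) →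
    orden.Pairwise (· ≤ ·) →
    (∀ j (hj : j < orden.length), (j : Int) < lo → orden[j] < x) →
    (∀ j (hj : j < orden.length), hi ≤ (j : Int) → x ≤ orden[j]) →
    contaMenoresLoop orden x lo hi = (orden.countP (fun y => decide (y < x)) : Int) := by
  intro lo hi
  induction lo, hi using contaMenoresLoop.induct orden x with
  | case1 lo hi h mid hcmp ih =>
    intro h0 hlohi hhi hsort hlow hhigh
    have hmid := PySem.Int.floordiv_two_mid_bounds (le_of_lt h)
    have hmidlt : mid < hi := by
      simpa [mid] using (PySem.Int.floordiv_lt_iff_lt_mul (a := lo + hi) (q := hi) (by omega : (0:Int) < 2)).2 (by omega)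
    rw [contaMenoresLoop]
    simp only [dif_pos h]
    rw [if_pos (show PySem.List.pyGetD orden (PySem.Int.floordiv (lo + hi) 2) 0 < x from hcmp)]
    have hmval : PySem.List.pyGetD orden mid 0 = orden[mid.toNat]'(by omega) := by
      exact PySem.List.pyGetD_eq_getElem orden 0 (by omega) (by omega)
    apply ih (by omega) (by omega) hhi hsort
    · intro j hj hjlt
      rcases lt_or_ge (j : Int) lo with hc | hc
      · exact hlow j hj hc
      · have : orden[j] ≤ orden[mid.toNat]'(by omega) := by
          rcases eq_or_lt_of_le (show j ≤ mid.toNat by omega) with he | hl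
          · subst he; exact le_refl _
          · exact (List.pairwise_iff_getElem.1 hsort) j mid.toNat hj (by omega) hl
        calc orden[j] ≤ _ := this
          _ < x := by rw [← hmval]; exact hcmp
    · exact hhigh
  | case2 lo hi h mid hcmp ih =>
    intro h0 hlohi hhi hsort hlow hhigh
    have hmid := PySem.Int.floordiv_two_mid_bounds (le_of_lt h)
    have hmidlt : mid < hi := by
      simpa [mid] using (PySem.Int.floordiv_lt_iff_lt_mul (a := lo + hi) (q := hi) (by omega : (0:Int) < 2)).2 (by omega)
    rw [contaMenoresLoop]
    simp only [dif_pos h]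
    rw [if_neg (show ¬ PySem.List.pyGetD orden (PySem.Int.floordiv (lo + hi) 2) 0 < x from hcmp)]
    have hmval : PySem.List.pyGetD orden mid 0 = orden[mid.toNat]'(by omega) := by
      exact PySem.List.pyGetD_eq_getElem orden 0 (by omega) (by omega)
    apply ih h0 (by omega) (by omega) hsort hlow
    · intro j hj hjge
      have hxm : x ≤ orden[mid.toNat]'(by omega) := by rw [← hmval]; omega
      rcases eq_or_lt_of_le (show mid.toNat ≤ j by omega) with he | hl
      · subst he; exact hxm
      · exact le_trans hxm ((List.pairwise_iff_getElem.1 hsort) mid.toNat j (by omega) hj hl)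
  | case3 lo hi h =>
    intro h0 hlohi hhi hsort hlow hhigh
    rw [contaMenoresLoop]
    simp only [dif_neg h]
    have : lo = hi := by omega
    subst this
    rw [countP_of_split orden x lo.toNat (by omega)
      (fun j hj hjl => hlow j hj (by omega)) (fun j hj hjl => hhigh j hj (by omega))]
    omega

-- splitting a count at lo (for lo ≤ hi): (#<hi) = (#<lo) + (#in [lo,hi))
lemma countP_split_le (lo hi : Int) (h : lo ≤ hi) : ∀ (l : List Int),
    l.countP (fun y => decide (y < hi))
    = l.countP (fun y => decide (y < lo)) + l.countP (fun e => decide (e ≥ lo ∧ e < hi))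
  | [] => by simp
  | a :: t => by
    have ih := countP_split_le lo hi h t
    simp only [List.countP_cons]
    split_ifs with h1 h2 h3 h2 h3 <;> simp_all <;> omega

-- B's per-class formula equals the direct count of values in [lo, hi)
lemma max_sub (valores : List Int) (lo hi : Int) :
    max ((valores.countP (fun y => decide (y < hi)) : Int) - (valores.countP (fun y => decide (y < lo)) : Int)) 0
    = (valores.countP (fun e => decide (e ≥ lo ∧ e < hi)) : Int) := by
  rcases le_or_gt lo hi with h | h
  · rw [countP_split_le lo hi h valores]
    push_cast
    omega
  · have h0 : valores.countP (fun e => decide (e ≥ lo ∧ e < hi)) = 0 := by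
      rw [List.countP_eq_zero]
      intro a _
      simp only [decide_eq_true_eq, not_and]
      omega
    have hle : valores.countP (fun y => decide (y < hi)) ≤ valores.countP (fun y => decide (y < lo)) := by
      apply List.countP_mono_left
      intro x _ hx
      simp only [decide_eq_true_eq] at *
      omega
    rw [h0]
    push_cast
    omega

-- contaMenores on the sorted copy counts the values of 'valores' below x
lemma contaMenores_eq (valores : List Int) (x : Int) :
    contaMenores (PySem.List.sorted valores id) x
    = (valores.countP (fun y => decide (y < x)) : Int) := by
  have hperm := PySem.List.sorted_perm valores id false
  have hsort : (PySem.List.sorted valores id).Pairwise (· ≤ ·) := by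
    simpa using PySem.List.sorted_pairwise valores id
  unfold contaMenores
  rw [loop_inv _ x 0 _ (le_refl 0) (by positivity) (le_refl _) hsort
    (fun j hj hjl => absurd hjl (by omega)) (fun j hj hjl => absurd hjl (by omega))]
  rw [hperm.countP_eq]

-- ===== VERDICT (by name: the statement is the Claim_ definition above) =====
theorem histograma_spec : Claim_equal_histograma := by
  intro valores intervalos _hdom
  unfold Spec_histograma histograma_alt
  rw [zipPairs, histograma_eq_map]
  apply List.map_congr_left
  intro j _
  rw [cntf, ← max_sub valores (intervalos.getD j 0) (intervalos.getD (j + 1) 0),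
    contaMenores_eq, contaMenores_eq]
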